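-- pv_equiv track=rewrite | github.com/90sidort/exercises_Python | reversing_And_Combining_Text.py | reverse_and_combine_text
-- ===== SOURCE A (Python) =====
-- def reverse_and_combine_text(text):
--     text = text.split()
--     new_text = []
--     while len(text) > 1:
--         for x in text:
--             x = x[::-1]
--             new_text.append(x)
--         text = []
--         text = [x+y for x,y in zip(new_text[0::2], new_text[1::2])]
--         odd = True if len(new_text) % 2 != 0 else False
--         if odd:
--             text.append(new_text[-1])
--         new_text = []
--     return "".join(text)
-- ===== SOURCE B (Python) =====
-- def reverse_and_combine_text(text):
--     words = text.split()
--     # each element is a list of (word_index, flipped) tokens; combine lazily,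
--     # build the output string once at the end
--     elems = [[(i, False)] for i in range(len(words))]
--     while len(elems) > 1:
--         # one level: each element becomes rev(element), i.e. tokens reversed
--         # with flips toggled, then pairs are concatenated
--         flipped = [[(i, not f) for (i, f) in reversed(e)] for e in elems]
--         nxt = [a + b for a, b in zip(flipped[0::2], flipped[1::2])]
--         if len(flipped) % 2 != 0:
--             nxt.append(flipped[-1])
--         elems = nxt
--     out = []
--     if elems:
--         for i, f in elems[0]:
--             w = words[i]
--             out.append(w[::-1] if f else w)
--     return "".join(out)
-- ===== Notes on version B (the rewrite author's own statement) =====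
-- stated objective: alternative
-- what changed: Instead of rebuilding every intermediate string at each combining level, B reduces lists of (word-index, flipped) tokens lazily (reversing a combined piece is just reversing its token list and toggling the flags) and emits the final string in one pass at the end; character copying drops from O(L log W) to O(L), traded for O(W log W) token bookkeeping.
import Mathlib
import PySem

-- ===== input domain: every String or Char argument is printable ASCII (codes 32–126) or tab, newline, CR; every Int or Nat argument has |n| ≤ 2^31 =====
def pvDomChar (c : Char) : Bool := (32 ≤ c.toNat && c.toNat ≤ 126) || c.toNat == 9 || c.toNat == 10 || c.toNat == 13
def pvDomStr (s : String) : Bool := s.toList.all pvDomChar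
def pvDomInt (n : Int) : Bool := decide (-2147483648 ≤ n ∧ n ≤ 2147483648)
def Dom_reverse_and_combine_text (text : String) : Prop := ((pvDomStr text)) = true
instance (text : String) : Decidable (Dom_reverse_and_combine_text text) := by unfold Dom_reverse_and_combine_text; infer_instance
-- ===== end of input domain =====

-- B replaces A's per-level string rebuilding by lazy (word-index, flipped) tokens, emitting the
-- final string once at the end (objective: alternative; per-level work shuffles tokens, not characters).
-- Strings are represented by their char lists (exact for the ASCII domain; PySem.Chars/PySem.List ops).

-- ===== PORT A =====
-- one pass of A's while-loop body
def pvStepA (text : List (List Char)) : List (List Char) :=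
  let new_text := text.map (fun x => (PySem.List.slice? x none none (-1)).getD [])  -- x[::-1]
  let t := (List.zip ((PySem.List.slice? new_text (some 0) none 2).getD [])
                     ((PySem.List.slice? new_text (some 1) none 2).getD [])).map (fun p => p.1 ++ p.2)
  if new_text.length % 2 ≠ 0 then t ++ [(PySem.List.pyGet? new_text (-1)).getD []] else t  -- new_text[-1]

-- A's while-loop; the Nat fuel (= initial word count) only bounds the iteration count
-- (each pass strictly shrinks a list of length > 1, so the fuel is never exhausted)
def pvLoopA : Nat → List (List Char) → List (List Char)
  | 0, text => text
  | f + 1, text => if text.length > 1 then pvLoopA f (pvStepA text) else text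

def reverse_and_combine_text (text : String) : String :=
  let words := (PySem.Str.split₀ text).map String.toList  -- text.split()
  String.ofList (PySem.Chars.join [] (pvLoopA words.length words))     -- "".join(...)

-- ===== PORT B =====
-- flip(e): [(i, not f) for (i, f) in reversed(e)]
def pvFlip (e : List (Int × Bool)) : List (Int × Bool) :=
  e.reverse.map (fun t => (t.1, !t.2))

-- one pass of B's while-loop body (token elements, no character copying)
def pvStepB (elems : List (List (Int × Bool))) : List (List (Int × Bool)) :=
  let flipped := elems.map pvFlip
  let nxt := (List.zip ((PySem.List.slice? flipped (some 0) none 2).getD [])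
                       ((PySem.List.slice? flipped (some 1) none 2).getD [])).map (fun p => p.1 ++ p.2)
  if flipped.length % 2 ≠ 0 then nxt ++ [(PySem.List.pyGet? flipped (-1)).getD []] else nxt

-- B's while-loop, same fuel convention as pvLoopA
def pvLoopB : Nat → List (List (Int × Bool)) → List (List (Int × Bool))
  | 0, elems => elems
  | f + 1, elems => if elems.length > 1 then pvLoopB f (pvStepB elems) else elems

-- emit one token: words[i], reversed iff the flip flag is set (words[i] is always in range)
def pvTok (words : List (List Char)) (t : Int × Bool) : List Char :=
  let w := PySem.List.pyGetD words t.1 []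
  if t.2 then (PySem.List.slice? w none none (-1)).getD [] else w  -- w[::-1]

def reverse_and_combine_text_alt (text : String) : String :=
  let words := (PySem.Str.split₀ text).map String.toList              -- text.split()
  let elems := (PySem.List.pyRange 0 (words.length : Int) 1).map (fun i => [(i, false)])
  let fin := pvLoopB elems.length elems
  let out : List (List Char) := match fin with
    | [] => []
    | e :: _ => e.map (pvTok words)
  String.ofList (PySem.Chars.join [] out)                             -- "".join(out)

-- ===== PRECONDITION & SPEC =====
def Spec_reverse_and_combine_text (text : String) (out : String) : Prop := out = reverse_and_combine_text_alt text
instance (text : String) (out : String) : Decidable (Spec_reverse_and_combine_text text out) := by unfold Spec_reverse_and_combine_text; infer_instance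

-- ===== CLAIM (what is proved, stated in full; the proofs are below) =====
def Claim_equal_reverse_and_combine_text : Prop := ∀ (text : String), Dom_reverse_and_combine_text text → Spec_reverse_and_combine_text text (reverse_and_combine_text text)

-- ===== LEMMAS AND PROOFS =====
-- shared slice characterisation: xs[0::2] / xs[1::2] as simple recursions (needed for termination)
def pvEvens {α : Type} : List α → List α
  | [] => []
  | [x] => [x]
  | x :: _ :: r => x :: pvEvens r

def pvOdds {α : Type} : List α → List α
  | [] => []
  | [_] => []
  | _ :: y :: r => y :: pvOdds r

lemma pv_slice0_cons {α : Type} (x : α) (xs : List α) :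
    PySem.List.slice? (x :: xs) (some 0) none 2 = (PySem.List.slice? xs (some 1) none 2).map (x :: ·) := by
  simp only [PySem.List.slice?, PySem.List.sliceIndices]
  norm_num
  have hc : ((↑xs.length + 1 - min (0:Int) (↑xs.length + 1) + 2 - 1) / 2).toNat
      = (if 1 < xs.length then ((↑xs.length - min (1:Int) ↑xs.length + 2 - 1) / 2).toNat else 0) + 1 := by
    split_ifs with h <;> omega
  rw [hc, List.range_succ_eq_map, List.filterMap_cons, List.filterMap_map]
  have hmin0 : min (0:Int) (↑xs.length + 1) = 0 := by omega
  simp only [Nat.cast_zero, mul_zero, add_zero, hmin0, Int.toNat_zero, List.getElem?_cons_zero]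
  congr 1
  apply List.filterMap_congr
  intro k hk
  rcases Nat.eq_zero_or_pos xs.length with h0' | hpos
  · simp [List.length_eq_zero_iff.mp h0'] at hk ⊢
  · have hidx : ((0:Int) + 2 * ((Nat.succ k : Nat):Int)).toNat
        = (min (1:Int) ↑xs.length + 2 * (k:Int)).toNat + 1 := by omega
    simp only [Function.comp_apply, hidx, List.getElem?_cons_succ]

lemma pv_slice1_cons {α : Type} (x : α) (xs : List α) :
    PySem.List.slice? (x :: xs) (some 1) none 2 = PySem.List.slice? xs (some 0) none 2 := by
  simp only [PySem.List.slice?, PySem.List.sliceIndices]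
  norm_num
  apply List.filterMap_congr
  intro k hk
  have hidx : ((1:Int) + 2 * (k:Int)).toNat = (2 * (k:Int)).toNat + 1 := by omega
  simp only [hidx, List.getElem?_cons_succ]

lemma pv_evens_odds_cons {α : Type} (xs : List α) :
    ∀ (x : α), pvEvens (x :: xs) = x :: pvOdds xs ∧ pvOdds (x :: xs) = pvEvens xs := by
  induction xs using pvOdds.induct with
  | case1 => intro x; simp [pvEvens, pvOdds]
  | case2 y => intro x; simp [pvEvens, pvOdds]
  | case3 y z r ih =>
      intro x
      refine ⟨?_, ?_⟩
      · show x :: pvEvens (z :: r) = x :: (z :: pvOdds r)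
        rw [(ih z).1]
      · show y :: pvOdds (z :: r) = y :: pvEvens r
        rw [(ih z).2]

lemma pv_slice_step2 {α : Type} (xs : List α) :
    PySem.List.slice? xs (some 0) none 2 = some (pvEvens xs)
      ∧ PySem.List.slice? xs (some 1) none 2 = some (pvOdds xs) := by
  induction xs with
  | nil =>
      constructor <;> · simp [PySem.List.slice?, PySem.List.sliceIndices, pvEvens, pvOdds]
  | cons x xs ih =>
      refine ⟨?_, ?_⟩
      · rw [pv_slice0_cons, ih.2, (pv_evens_odds_cons xs x).1]; rfl
      · rw [pv_slice1_cons, ih.1, (pv_evens_odds_cons xs x).2]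

lemma pvEvens_length {α : Type} (xs : List α) : (pvEvens xs).length = (xs.length + 1) / 2 := by
  induction xs using pvEvens.induct with
  | case1 => simp [pvEvens]
  | case2 x => simp [pvEvens]
  | case3 x y r ih => simp [pvEvens, ih]; omega

lemma pvOdds_length {α : Type} (xs : List α) : (pvOdds xs).length = xs.length / 2 := by
  induction xs using pvOdds.induct with
  | case1 => simp [pvOdds]
  | case2 x => simp [pvOdds]
  | case3 x y r ih => simp [pvOdds, ih]; omega

lemma pvStepB_length (elems : List (List (Int × Bool))) :
    (pvStepB elems).length = (elems.length + 1) / 2 := by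
  simp only [pvStepB, (pv_slice_step2 _).1, (pv_slice_step2 _).2, Option.getD_some, List.length_map]
  split_ifs with h <;>
    simp [List.length_zip, pvEvens_length, pvOdds_length, List.length_map] <;> omega

-- the string an element of B's token lists denotes
def pvDen (ws : List (List Char)) (e : List (Int × Bool)) : List Char :=
  (e.map (pvTok ws)).flatten

lemma pvDen_nil (ws : List (List Char)) : pvDen ws [] = [] := rfl

lemma pvDen_append (ws : List (List Char)) (e₁ e₂ : List (Int × Bool)) :
    pvDen ws (e₁ ++ e₂) = pvDen ws e₁ ++ pvDen ws e₂ := by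
  simp [pvDen]

lemma pvTok_toggle (ws : List (List Char)) (t : Int × Bool) :
    pvTok ws (t.1, !t.2) = (pvTok ws t).reverse := by
  rcases t with ⟨i, f⟩
  cases f <;> simp [pvTok, PySem.List.slice?_none_none_neg_one]

lemma pvDen_flip (ws : List (List Char)) (e : List (Int × Bool)) :
    pvDen ws (pvFlip e) = (pvDen ws e).reverse := by
  simp only [pvDen, pvFlip, List.map_map, List.reverse_flatten, ← List.map_reverse]
  congr 1
  apply List.map_congr_left
  intro t _
  exact pvTok_toggle ws t

lemma pvEvens_map {α β : Type} (f : α → β) (xs : List α) :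
    pvEvens (xs.map f) = (pvEvens xs).map f := by
  induction xs using pvEvens.induct with
  | case1 => simp [pvEvens]
  | case2 x => simp [pvEvens]
  | case3 x y r ih => simp [pvEvens, ih]

lemma pvOdds_map {α β : Type} (f : α → β) (xs : List α) :
    pvOdds (xs.map f) = (pvOdds xs).map f := by
  induction xs using pvOdds.induct with
  | case1 => simp [pvOdds]
  | case2 x => simp [pvOdds]
  | case3 x y r ih => simp [pvOdds, ih]

lemma pv_pyGet?_map {α β : Type} (f : α → β) (xs : List α) (i : Int) :
    PySem.List.pyGet? (xs.map f) i = (PySem.List.pyGet? xs i).map f := by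
  simp only [PySem.List.pyGet?, List.length_map]
  cases PySem.List.pyIdx? xs.length i <;> simp [List.getElem?_map]

lemma pvStep_comm (ws : List (List Char)) (es : List (List (Int × Bool))) :
    pvStepA (es.map (pvDen ws)) = (pvStepB es).map (pvDen ws) := by
  have hnt : (es.map (pvDen ws)).map (fun x => (PySem.List.slice? x none none (-1)).getD [])
      = (es.map pvFlip).map (pvDen ws) := by
    simp only [List.map_map]
    apply List.map_congr_left
    intro e _
    simp [PySem.List.slice?_none_none_neg_one, Function.comp, pvDen_flip]
  simp only [pvStepA, pvStepB, hnt, (pv_slice_step2 _).1, (pv_slice_step2 _).2, Option.getD_some,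
    pvEvens_map, pvOdds_map, List.zip_map, List.length_map, pv_pyGet?_map, List.map_map]
  split_ifs with h
  · simp only [List.map_append, List.map_map, List.map_cons, List.map_nil]
    congr 1
    · apply List.map_congr_left; intro p _
      simp [Function.comp_def, pvDen_append]
    · cases PySem.List.pyGet? es (-1) <;> simp [pvDen_nil]
  · simp only [List.map_map]
    apply List.map_congr_left; intro p _
    simp [Function.comp_def, pvDen_append]

lemma pvLoop_comm (ws : List (List Char)) (f : Nat) :
    ∀ (es : List (List (Int × Bool))),
      pvLoopA f (es.map (pvDen ws)) = (pvLoopB f es).map (pvDen ws) := by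
  induction f with
  | zero => intro es; rfl
  | succ f ih =>
      intro es
      simp only [pvLoopA, pvLoopB, List.length_map]
      split_ifs with h
      · rw [pvStep_comm, ih]
      · rfl

lemma pvLoopB_length (f : Nat) :
    ∀ (es : List (List (Int × Bool))), es.length ≤ f + 1 → (pvLoopB f es).length ≤ 1 := by
  induction f with
  | zero => intro es h; simpa [pvLoopB] using h
  | succ f ih =>
      intro es h
      simp only [pvLoopB]
      split_ifs with hgt
      · exact ih _ (by rw [pvStepB_length]; omega)
      · omega

lemma pv_join_nil_flatten (l : List (List Char)) :
    PySem.Chars.join [] l = l.flatten := by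
  induction l with
  | nil => simp [PySem.Chars.join_nil]
  | cons x r ih =>
      cases r with
      | nil => simp [PySem.Chars.join_singleton]
      | cons y s => rw [PySem.Chars.join_cons_cons, ih]; simp

lemma pvInit_den (ws : List (List Char)) :
    ((PySem.List.pyRange 0 (ws.length : Int) 1).map (fun i => [((i : Int), false)])).map (pvDen ws)
      = ws := by
  have h := PySem.List.map_pyGetD_pyRange_zero' ws []
  simp only [List.map_map]
  calc ((PySem.List.pyRange 0 (ws.length : Int) 1).map (pvDen ws ∘ fun i => [((i : Int), false)]))
      = (PySem.List.pyRange 0 (ws.length : Int) 1).map (fun j => PySem.List.pyGetD ws j []) := by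
        apply List.map_congr_left
        intro i _
        simp [pvDen, pvTok, Function.comp]
    _ = ws := h

-- ===== VERDICT (by name: the statement is the Claim_ definition above) =====
theorem reverse_and_combine_text_spec : Claim_equal_reverse_and_combine_text := by
  intro text _dom
  unfold Spec_reverse_and_combine_text reverse_and_combine_text reverse_and_combine_text_alt
  dsimp only
  apply congrArg String.ofList
  generalize (PySem.Str.split₀ text).map String.toList = ws
  have hElen : ((PySem.List.pyRange 0 (ws.length : Int) 1).map
      (fun i => [((i : Int), false)])).length = ws.length := by
    simp [PySem.List.length_pyRange_one]
  have hloop : pvLoopA ws.length ws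
      = (pvLoopB ws.length ((PySem.List.pyRange 0 (ws.length : Int) 1).map (fun i => [((i : Int), false)]))).map (pvDen ws) := by
    have h := pvLoop_comm ws ws.length
      ((PySem.List.pyRange 0 (ws.length : Int) 1).map (fun i => [((i : Int), false)]))
    rw [pvInit_den ws] at h
    exact h
  rw [hElen, hloop]
  have hlen := pvLoopB_length ws.length ((PySem.List.pyRange 0 (ws.length : Int) 1).map (fun i => [((i : Int), false)])) (by omega)
  cases hfin : pvLoopB ws.length ((PySem.List.pyRange 0 (ws.length : Int) 1).map (fun i => [((i : Int), false)])) with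
  | nil => simp [PySem.Chars.join_nil]
  | cons e rest =>
      rw [hfin] at hlen
      have hrest : rest = [] := by
        cases rest with
        | nil => rfl
        | cons a b => simp at hlen
      subst hrest
      simp [PySem.Chars.join_singleton, pv_join_nil_flatten, pvDen]
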